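-- pv_equiv track=rewrite | github.com/PerceptronV/dudocode | dudocode/transpiler/functools.py | check_line_by_line_closure
-- ===== SOURCE A (Python) =====
-- def border_valid(string, idx):
--     if idx < 0 or idx >= len(string):
--         return True
--     else:
--         return not string[idx].isalnum()
--
-- def check_line_by_line_closure(start_keyword, end_keyword, source):
--     source = source.replace("\r", '')
--     start_keylen = len(start_keyword)
--     end_keylen = len(end_keyword)
--
--     if source[:start_keylen] == start_keyword and border_valid(source, start_keylen):
--         for line in source.split('\n')[1:]:
--             if len(line) > 0 and line[0] not in (' ', '\t'):
--                 return True
--         return False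
--     else:
--         return True
-- ===== SOURCE B (Python) =====
-- def check_line_by_line_closure(start_keyword, end_keyword, source):
--     src = source.replace("\r", "")
--     k = len(start_keyword)
--     if not src.startswith(start_keyword):
--         return True
--     if k < len(src) and src[k].isalnum():
--         return True
--     return any(a == '\n' and b not in ' \t\n' for a, b in zip(src, src[1:]))
-- ===== Notes on version B (the rewrite author's own statement) =====
-- stated objective: idiomatic
-- what changed: B drops the split-into-lines pass and its explicit loop: after the same prefix and word-border checks it decides the result with a single any() over adjacent character pairs, looking for a newline immediately followed by a non-blank, non-newline character.
import Mathlib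
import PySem

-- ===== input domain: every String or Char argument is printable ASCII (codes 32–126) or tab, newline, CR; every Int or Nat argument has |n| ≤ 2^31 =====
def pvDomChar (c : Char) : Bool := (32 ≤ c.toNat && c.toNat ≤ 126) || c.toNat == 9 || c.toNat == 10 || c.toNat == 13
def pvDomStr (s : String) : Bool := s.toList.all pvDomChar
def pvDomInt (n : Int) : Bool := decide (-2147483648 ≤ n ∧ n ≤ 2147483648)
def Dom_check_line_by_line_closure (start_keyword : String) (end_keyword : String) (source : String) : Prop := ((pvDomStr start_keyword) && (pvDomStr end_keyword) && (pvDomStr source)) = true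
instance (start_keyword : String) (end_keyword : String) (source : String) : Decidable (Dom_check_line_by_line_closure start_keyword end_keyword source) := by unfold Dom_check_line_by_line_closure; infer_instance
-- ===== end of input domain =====

-- B replaces A's split-into-lines pass and loop by a single any() over adjacent character pairs (idiomatic, same cost).

-- ===== PORT A =====
-- border_valid(string, idx)
def pvBorderValid (s : List Char) (idx : Int) : Bool :=
  if idx < 0 || (s.length : Int) ≤ idx then true
  else !(PySem.Chars.isalnum ((PySem.List.pyGet? s idx).getD ' '))  -- idx is in range here, so the getD default is unreachable

-- the for-loop over source.split('\n')[1:] with its early return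
def pvLoopA : List (List Char) → Bool
  | [] => false
  | line :: rest =>
      if 0 < line.length && !(line.headD ' ' == ' ' || line.headD ' ' == '\t') then true
      else pvLoopA rest

def check_line_by_line_closure (start_keyword : String) (end_keyword : String) (source : String) : Bool :=
  let src := PySem.Chars.replace source.toList "\r".toList "".toList
  let start_keylen : Int := (start_keyword.toList.length : Int)
  let _end_keylen : Int := (end_keyword.toList.length : Int)
  if (PySem.List.slice src none (some start_keylen) == start_keyword.toList)
      && pvBorderValid src start_keylen then
    pvLoopA ((PySem.Chars.splitOn src "\n".toList).drop 1)
  else true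

-- ===== PORT B =====
def check_line_by_line_closure_alt (start_keyword : String) (end_keyword : String) (source : String) : Bool :=
  let src := PySem.Chars.replace source.toList "\r".toList "".toList
  let k : Nat := start_keyword.toList.length
  if !(PySem.Chars.startswith src start_keyword.toList) then true
  else if decide (k < src.length) && PySem.Chars.isalnum (src.getD k ' ') then true
  else (src.zip (PySem.List.slice src (some 1) none)).any
         (fun p => p.1 == '\n' && !(p.2 == ' ' || p.2 == '\t' || p.2 == '\n'))

-- ===== PRECONDITION & SPEC =====
def Spec_check_line_by_line_closure (start_keyword : String) (end_keyword : String) (source : String) (out : Bool) : Prop := out = check_line_by_line_closure_alt start_keyword end_keyword source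
instance (start_keyword : String) (end_keyword : String) (source : String) (out : Bool) : Decidable (Spec_check_line_by_line_closure start_keyword end_keyword source out) := by unfold Spec_check_line_by_line_closure; infer_instance

-- ===== CLAIM (what is proved, stated in full; the proofs are below) =====
def Claim_equal_check_line_by_line_closure : Prop := ∀ (start_keyword : String) (end_keyword : String) (source : String), Dom_check_line_by_line_closure start_keyword end_keyword source → Spec_check_line_by_line_closure start_keyword end_keyword source (check_line_by_line_closure start_keyword end_keyword source)

-- ===== LEMMAS AND PROOFS =====

-- fuel-free model of PySem.Chars.splitOn for the separator ['\n']
def splitNl (pre : List Char) : List Char → List (List Char)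
  | [] => [pre]
  | c :: rest => if c = '\n' then pre :: splitNl [] rest else splitNl (pre ++ [c]) rest

theorem go_eq_splitNl (fuel : Nat) :
    ∀ (l cur : List Char) (acc : List (List Char)), l.length ≤ fuel →
      PySem.Chars.splitOn.go ['\n'] fuel l cur acc = acc.reverse ++ splitNl cur.reverse l := by
  induction fuel with
  | zero =>
    intro l cur acc h
    have : l = [] := by cases l <;> simp_all
    subst this
    simp [PySem.Chars.splitOn.go, splitNl]
  | succ n ih =>
    intro l cur acc h
    cases l with
    | nil => simp [PySem.Chars.splitOn.go, splitNl]
    | cons c rest =>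
      have hr : rest.length ≤ n := by simpa using h
      by_cases hc : c = '\n'
      · subst hc
        rw [PySem.Chars.splitOn.go]
        simp only [List.isPrefixOf, BEq.rfl, Bool.true_and, List.length_cons, List.length_nil,
          List.drop_succ_cons, List.drop_zero]
        rw [ih rest [] (cur.reverse :: acc) hr]
        simp [splitNl]
      · rw [PySem.Chars.splitOn.go]
        have hpre : ['\n'].isPrefixOf (c :: rest) = false := by
          simp [List.isPrefixOf]
          exact fun hh => (hc hh.symm).elim
        rw [if_neg (by simp [hpre])]
        rw [ih rest (c :: cur) acc hr]
        simp [splitNl, hc]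

theorem splitOn_eq_splitNl (s : List Char) :
    PySem.Chars.splitOn s ['\n'] = splitNl [] s := by
  have := go_eq_splitNl (s.length + 1) s [] [] (by omega)
  simpa [PySem.Chars.splitOn] using this

-- B's any-over-adjacent-pairs, in recursive form for the induction
def pvScanB : List Char → Bool
  | a :: b :: rest => (a == '\n' && !(b == ' ' || b == '\t' || b == '\n')) || pvScanB (b :: rest)
  | _ => false

theorem zipAny_eq_pvScanB (cs : List Char) :
    (cs.zip (PySem.List.slice cs (some 1) none)).any
      (fun p => p.1 == '\n' && !(p.2 == ' ' || p.2 == '\t' || p.2 == '\n')) = pvScanB cs := by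
  rw [PySem.List.slice_from cs (by omega : (0:Int) ≤ 1)]
  induction cs with
  | nil => simp [pvScanB]
  | cons a t ih =>
    cases t with
    | nil => simp [pvScanB]
    | cons b r =>
      simp only [Int.toNat_one, List.drop_succ_cons, List.drop_zero, List.zip_cons_cons,
        List.any_cons, pvScanB]
      rw [← ih]
      simp

theorem pvScanB_cons (c : Char) (r : List Char) (h : c ≠ '\n') :
    pvScanB (c :: r) = pvScanB r := by
  cases r with
  | nil => simp [pvScanB]
  | cons b rr => simp [pvScanB, h]

theorem splitNl_head (l : List Char) : ∀ pre, ∃ t rest, splitNl pre l = (pre ++ t) :: rest := by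
  induction l with
  | nil => intro pre; exact ⟨[], [], by simp [splitNl]⟩
  | cons c r ih =>
    intro pre
    by_cases hc : c = '\n'
    · exact ⟨[], splitNl [] r, by simp [splitNl, hc]⟩
    · obtain ⟨t, rest, hrw⟩ := ih (pre ++ [c])
      exact ⟨c :: t, rest, by simp [splitNl, hc, hrw]⟩

-- A's line loop over the tail lines equals B's adjacent-pair scan
theorem key (n : Nat) : ∀ (cs : List Char), cs.length ≤ n →
    (∀ pre, pvLoopA ((splitNl pre cs).drop 1) = pvScanB cs) ∧
    (pvLoopA (splitNl [] cs) = pvScanB ('\n' :: cs)) := by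
  induction n with
  | zero =>
    intro cs h
    have : cs = [] := by cases cs <;> simp_all
    subst this
    simp [splitNl, pvLoopA, pvScanB]
  | succ n ih =>
    intro cs h
    cases cs with
    | nil => simp [splitNl, pvLoopA, pvScanB]
    | cons c r =>
      have hr : r.length ≤ n := by simpa using h
      constructor
      · intro pre
        by_cases hc : c = '\n'
        · subst hc
          simp only [splitNl]
          exact (ih r hr).2
        · rw [splitNl, if_neg hc, ((ih r hr).1 (pre ++ [c])), pvScanB_cons c r hc]
      · by_cases hc : c = '\n'
        · subst hc
          rw [splitNl, if_pos rfl]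
          have : pvLoopA ([] :: splitNl [] r) = pvLoopA (splitNl [] r) := by simp [pvLoopA]
          rw [this, (ih r hr).2]
          cases r with
          | nil => simp [pvScanB]
          | cons b rr => simp [pvScanB]
        · rw [splitNl, if_neg hc]
          simp only [List.nil_append]
          obtain ⟨t, rest, hrw⟩ := splitNl_head r ([] ++ [c])
          simp only [List.nil_append] at hrw
          by_cases hsp : c = ' ' ∨ c = '\t'
          · have h1 : pvLoopA (splitNl [c] r) = pvLoopA ((splitNl [c] r).drop 1) := by
              rw [hrw]; rcases hsp with h'|h' <;> subst h' <;> simp [pvLoopA]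
            rw [h1, (ih r hr).1 [c]]
            have h3 : pvScanB ('\n' :: c :: r) = pvScanB (c :: r) := by
              rcases hsp with h'|h' <;> subst h' <;> cases r <;> simp [pvScanB]
            rw [h3, pvScanB_cons c r hc]
          · rw [not_or] at hsp
            have h1 : pvLoopA (splitNl [c] r) = true := by
              rw [hrw]; simp [pvLoopA, hsp.1, hsp.2]
            have h2 : pvScanB ('\n' :: c :: r) = true := by
              simp [pvScanB, hc, hsp.1, hsp.2]
            rw [h1, h2]

theorem take_beq_eq_startswith (sk src : List Char) :
    (List.take sk.length src == sk) = PySem.Chars.startswith src sk := by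
  by_cases hp : sk <+: src
  · rw [(PySem.Chars.startswith_iff src sk).mpr hp]
    exact beq_iff_eq.mpr (List.prefix_iff_eq_take.mp hp).symm
  · have h1 : PySem.Chars.startswith src sk = false := by
      rcases Bool.eq_false_or_eq_true (PySem.Chars.startswith src sk) with h | h
      · exact absurd ((PySem.Chars.startswith_iff src sk).mp h) hp
      · exact h
    rw [h1, beq_eq_false_iff_ne]
    exact fun he => hp (List.prefix_iff_eq_take.mpr he.symm)

theorem borderValid_eq (src : List Char) (k : Nat) :
    pvBorderValid src (k : Int) = !(decide (k < src.length) && PySem.Chars.isalnum (src.getD k ' ')) := by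
  unfold pvBorderValid
  by_cases hk : k < src.length
  · rw [if_neg (by simp; omega)]
    rw [show PySem.List.pyGet? src (k : Int) = src[k]? from PySem.List.pyGet?_natCast src k]
    simp [hk, List.getD]
  · rw [if_pos (by simp; omega)]
    simp [hk]

-- ===== VERDICT (by name: the statement is the Claim_ definition above) =====
theorem check_line_by_line_closure_spec : Claim_equal_check_line_by_line_closure := by
  intro sk ek source _
  show check_line_by_line_closure sk ek source = check_line_by_line_closure_alt sk ek source
  simp only [check_line_by_line_closure, check_line_by_line_closure_alt]
  set src := PySem.Chars.replace source.toList "\r".toList "".toList with hsrc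
  set k : Nat := sk.toList.length with hk
  have hcond : (PySem.List.slice src none (some (k : Int)) == sk.toList && pvBorderValid src (k : Int))
      = (PySem.Chars.startswith src sk.toList
          && !(decide (k < src.length) && PySem.Chars.isalnum (src.getD k ' '))) := by
    rw [PySem.List.slice_to _ (Int.natCast_nonneg _), Int.toNat_natCast, hk,
      take_beq_eq_startswith, borderValid_eq]
  rcases Bool.eq_false_or_eq_true (PySem.Chars.startswith src sk.toList) with hsw | hsw
  · -- prefix matches
    rcases Bool.eq_false_or_eq_true
        (decide (k < src.length) && PySem.Chars.isalnum (src.getD k ' ')) with hc | hc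
    · -- border invalid: both sides return True
      rw [if_neg (by rw [hcond, hsw, hc]; simp), if_neg (by rw [hsw]; simp), if_pos hc]
    · -- the interesting branch: line loop vs adjacent-pair scan
      rw [if_pos (by rw [hcond, hsw, hc]; simp), if_neg (by rw [hsw]; simp), if_neg (by rw [hc]; simp)]
      rw [zipAny_eq_pvScanB]
      rw [(by decide : ("\n".toList : List Char) = ['\n']), splitOn_eq_splitNl]
      exact ((key src.length) src (le_refl _)).1 []
  · -- prefix does not match: both sides return True
    rw [if_neg (by rw [hcond, hsw]; simp), if_pos (by rw [hsw]; rfl)]
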